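-- pv_equiv track=rewrite | github.com/F12-Syntex/AdventOfCode2024 | 2024/day5/Day5.py | verifyOrderIsCorrect
-- ===== SOURCE A (Python) =====
-- def verifyOrderIsCorrect(rules, order):
--     for rule in rules:
--         before, after = rule
--
--         if before not in order or after not in order:
--             continue
--
--         if order.index(before) > order.index(after):
--             return False
--
--     return True
-- ===== SOURCE B (Python) =====
-- def verifyOrderIsCorrect(rules, order):
--     # One pass over rules builds before -> [afters]; one pass over order with a
--     # 'seen' set checks each first occurrence, removing A's repeated .index scans.
--     afters = {}
--     for before, after in rules:
--         afters.setdefault(before, []).append(after)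
--     seen = set()
--     for e in order:
--         if e in seen:
--             continue
--         for a in afters.get(e, []):
--             if a in seen:
--                 return False
--         seen.add(e)
--     return True
-- ===== Notes on version B (the rewrite author's own statement) =====
-- stated objective: faster
-- what changed: Replaced the per-rule membership tests and repeated list.index scans with a one-pass before->afters dict plus a single left-to-right walk of order keeping a seen set.
import Mathlib
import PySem

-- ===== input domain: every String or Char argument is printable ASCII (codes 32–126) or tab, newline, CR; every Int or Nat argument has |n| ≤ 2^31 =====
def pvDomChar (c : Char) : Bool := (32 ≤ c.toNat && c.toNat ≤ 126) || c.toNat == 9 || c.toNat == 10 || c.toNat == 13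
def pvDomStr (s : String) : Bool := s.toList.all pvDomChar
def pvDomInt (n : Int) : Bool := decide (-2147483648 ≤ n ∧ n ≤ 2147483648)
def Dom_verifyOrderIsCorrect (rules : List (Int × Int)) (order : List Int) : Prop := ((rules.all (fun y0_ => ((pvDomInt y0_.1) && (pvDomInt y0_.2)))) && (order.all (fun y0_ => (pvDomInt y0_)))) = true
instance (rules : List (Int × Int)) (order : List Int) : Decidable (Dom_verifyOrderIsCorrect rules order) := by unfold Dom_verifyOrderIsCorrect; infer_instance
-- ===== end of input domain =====

-- B replaces A's per-rule .index scans by a before->afters dict and one walk of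
-- order with a 'seen' set (faster: one pass each over rules and order).

-- ===== PORT A =====
-- 'for rule in rules' with early 'return False'; the guard ensures both index?
-- are 'some', so '.getD 0' is exact where it is reached.
def goA (order : List Int) : List (Int × Int) → Bool
  | [] => true
  | (before, after) :: rest =>
    if ¬ before ∈ order ∨ ¬ after ∈ order then goA order rest
    else if (PySem.List.index? order before).getD 0 > (PySem.List.index? order after).getD 0 then
      false
    else goA order rest

def verifyOrderIsCorrect (rules : List (Int × Int)) (order : List Int) : Bool :=
  goA order rules

-- ===== PORT B =====
-- afters.setdefault(before, []).append(after)  ==  afters[before] = afters.get(before, []) + [after]  ==  Dict.modify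
def buildAfters (rules : List (Int × Int)) : PySem.Dict Int (List Int) :=
  rules.foldl (fun d p => d.modify p.1 [] (· ++ [p.2])) PySem.Dict.empty

def goB (afters : PySem.Dict Int (List Int)) (seen : PySem.Set Int) : List Int → Bool
  | [] => true
  | e :: rest =>
    if e ∈ seen then goB afters seen rest
    else if (afters.getD e []).any (fun a => a ∈ seen) then false
    else goB afters (PySem.Set.add seen e) rest

def verifyOrderIsCorrect_alt (rules : List (Int × Int)) (order : List Int) : Bool :=
  goB (buildAfters rules) PySem.Set.empty order

-- ===== PRECONDITION & SPEC =====
def Spec_verifyOrderIsCorrect (rules : List (Int × Int)) (order : List Int) (out : Bool) : Prop := out = verifyOrderIsCorrect_alt rules order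
instance (rules : List (Int × Int)) (order : List Int) (out : Bool) : Decidable (Spec_verifyOrderIsCorrect rules order out) := by unfold Spec_verifyOrderIsCorrect; infer_instance

-- ===== CLAIM (what is proved, stated in full; the proofs are below) =====
def Claim_equal_verifyOrderIsCorrect : Prop := ∀ (rules : List (Int × Int)) (order : List Int), Dom_verifyOrderIsCorrect rules order → Spec_verifyOrderIsCorrect rules order (verifyOrderIsCorrect rules order)

-- ===== LEMMAS AND PROOFS =====

-- "rule p is violated in order" by first indices, as A computes it
def badB (order : List Int) (p : Int × Int) : Bool :=
  match PySem.List.index? order p.1, PySem.List.index? order p.2 with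
  | some i, some j => j < i
  | _, _ => false

theorem goA_eq_any (order : List Int) (rules : List (Int × Int)) :
    goA order rules = !(rules.any (badB order)) := by
  induction rules with
  | nil => simp [goA]
  | cons p rest ih =>
    obtain ⟨b, a⟩ := p
    by_cases hb : b ∈ order
    · by_cases ha : a ∈ order
      · obtain ⟨i, hi⟩ := Option.isSome_iff_exists.mp ((PySem.List.index?_isSome_iff order b).mpr hb)
        obtain ⟨j, hj⟩ := Option.isSome_iff_exists.mp ((PySem.List.index?_isSome_iff order a).mpr ha)
        have hbad : badB order (b, a) = decide (j < i) := by
          simp only [badB, hi, hj]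
        simp only [goA, hb, ha, not_true, or_self, if_false, hi, hj, Option.getD_some,
          List.any_cons, hbad]
        by_cases hlt : j < i
        · simp [hlt]
        · simp [hlt, ih]
      · have hbad : badB order (b, a) = false := by
          simp only [badB, (PySem.List.index?_eq_none_iff order a).mpr ha]
          cases PySem.List.index? order b <;> rfl
        simp [goA, hb, ha, ih, List.any_cons, hbad]
    · have hbad : badB order (b, a) = false := by
        simp only [badB, (PySem.List.index?_eq_none_iff order b).mpr hb]
      simp [goA, hb, ih, List.any_cons, hbad]

-- first-index violation ↔ 'p.2 occurs strictly before the first occurrence of p.1'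
theorem badB_iff_split (order : List Int) (p : Int × Int) :
    badB order p = true ↔ ∃ u v, order = u ++ p.1 :: v ∧ p.1 ∉ u ∧ p.2 ∈ u := by
  obtain ⟨b, a⟩ := p
  constructor
  · intro h
    unfold badB at h
    cases hi : PySem.List.index? order b with
    | none => rw [hi] at h; simp at h
    | some i =>
      cases hj : PySem.List.index? order a with
      | none => rw [hi, hj] at h; simp at h
      | some j =>
        rw [hi, hj] at h
        simp only [decide_eq_true_eq] at h
        obtain ⟨u, v, hsplit, hlen, hnotmem⟩ := (PySem.List.index?_eq_some_iff order b i).mp hi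
        obtain ⟨hjlt, hja, _⟩ := PySem.List.getElem_of_index?_eq_some hj
        refine ⟨u, v, hsplit, hnotmem, ?_⟩
        have hju : j < u.length := by omega
        have heq : order[j]'hjlt = u[j]'hju := by
          subst hsplit; exact List.getElem_append_left hju
        rw [hja] at heq
        exact heq ▸ List.getElem_mem hju
  · rintro ⟨u, v, hsplit, hbu, hau⟩
    have hi : PySem.List.index? order b = some u.length :=
      (PySem.List.index?_eq_some_iff order b u.length).mpr ⟨u, v, hsplit, rfl, hbu⟩
    have ha : a ∈ order := by subst hsplit; exact List.mem_append_left _ hau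
    obtain ⟨j, hj⟩ := Option.isSome_iff_exists.mp ((PySem.List.index?_isSome_iff order a).mpr ha)
    obtain ⟨hjlt, hja, hmin⟩ := PySem.List.getElem_of_index?_eq_some hj
    have hju : j < u.length := by
      by_contra hge
      obtain ⟨j0, hj0, hj0a⟩ := List.getElem_of_mem hau
      have hj0o : j0 < order.length := by subst hsplit; simp; omega
      have heq : order[j0]'hj0o = u[j0]'hj0 := by
        subst hsplit; exact List.getElem_append_left hj0
      exact hmin j0 (by omega) (heq.trans hj0a)
    unfold badB
    rw [hi, hj]
    simp only [decide_eq_true_eq]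
    omega

-- contents of the afters dict
theorem mem_afters (rules : List (Int × Int)) (b a : Int) :
    a ∈ (buildAfters rules).getD b [] ↔ (b, a) ∈ rules := by
  unfold buildAfters
  rw [PySem.Dict.getD_foldl_modify_append]
  simp only [PySem.Dict.getD_empty, List.nil_append, List.mem_map, List.mem_filter,
    beq_iff_eq]
  constructor
  · rintro ⟨⟨b', a'⟩, ⟨hmem, hb⟩, ha⟩
    simp at hb ha; subst hb; subst ha; exact hmem
  · intro h; exact ⟨(b, a), ⟨h, by simp⟩, rfl⟩

-- goB's loop invariant: seen has the same members as the processed prefix 'pre'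
theorem goB_true_iff (afters : PySem.Dict Int (List Int)) :
    ∀ (rest : List Int) (seen : PySem.Set Int) (pre : List Int),
      (∀ x : Int, x ∈ seen ↔ x ∈ pre) →
      (goB afters seen rest = true ↔
        ∀ u b v, rest = u ++ b :: v → b ∉ pre ++ u →
          ∀ a ∈ afters.getD b [], a ∉ pre ++ u) := by
  intro rest
  induction rest with
  | nil =>
    intro seen pre _
    simp only [goB, true_iff]
    intro u b v h
    exact absurd h (by simp)
  | cons e rest ih =>
    intro seen pre hseen
    by_cases he : e ∈ seen
    · have hepre : e ∈ pre := (hseen e).mp he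
      simp only [goB, if_pos he]
      rw [ih seen (pre ++ [e]) (fun x => by
        rw [hseen x]; constructor
        · intro hx; exact List.mem_append_left _ hx
        · intro hx; rcases List.mem_append.mp hx with hx | hx
          · exact hx
          · simp at hx; subst hx; exact hepre)]
      constructor
      · intro h u b v hsplit
        cases u with
        | nil =>
          rw [List.nil_append] at hsplit
          injection hsplit with h1 _
          subst h1
          intro hbmem
          exact absurd hepre (by simpa using hbmem)
        | cons f u' =>
          injection hsplit with h1 h2
          subst h1
          intro hbmem ha hamem hcontra
          exact h u' b v h2
            (by simpa [List.append_assoc] using hbmem) ha hamem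
            (by simpa [List.append_assoc] using hcontra)
      · intro h u b v hsplit hbmem a hamem hcontra
        exact h (e :: u) b v (by simp [hsplit])
          (by simpa [List.append_assoc] using hbmem) a hamem
          (by simpa [List.append_assoc] using hcontra)
    · have hepre : e ∉ pre := fun hx => he ((hseen e).mpr hx)
      simp only [goB, if_neg he]
      by_cases hbad : (afters.getD e []).any (fun a => a ∈ seen)
      · rw [if_pos hbad]
        simp only [Bool.false_eq_true, false_iff]
        intro hOK
        obtain ⟨a, haf, has⟩ := List.any_eq_true.mp hbad
        have hamem : a ∈ pre := (hseen a).mp (by simpa using has)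
        exact hOK [] e rest (by simp) (by simpa using hepre) a haf (by simpa using hamem)
      · rw [if_neg hbad]
        have hno : ∀ a ∈ afters.getD e [], a ∉ pre := by
          intro a ha hap
          exact hbad (List.any_eq_true.mpr ⟨a, ha, by simpa using (hseen a).mpr hap⟩)
        rw [ih (PySem.Set.add seen e) (pre ++ [e]) (fun x => by
          rw [PySem.Set.mem_add, hseen x]; simp [or_comm])]
        constructor
        · intro h u b v hsplit
          cases u with
          | nil =>
            rw [List.nil_append] at hsplit
            injection hsplit with h1 h2
            subst h1
            intro _ a ha
            simpa using hno a ha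
          | cons f u' =>
            injection hsplit with h1 h2
            subst h1
            intro hbmem ha hamem hcontra
            exact h u' b v h2
              (by simpa [List.append_assoc] using hbmem) ha hamem
              (by simpa [List.append_assoc] using hcontra)
        · intro h u b v hsplit hbmem a hamem hcontra
          exact h (e :: u) b v (by simp [hsplit])
            (by simpa [List.append_assoc] using hbmem) a hamem
            (by simpa [List.append_assoc] using hcontra)

theorem main_eq (rules : List (Int × Int)) (order : List Int) :
    verifyOrderIsCorrect rules order = verifyOrderIsCorrect_alt rules order := by
  have hA : verifyOrderIsCorrect rules order = true ↔
      ∀ p ∈ rules, ¬ ∃ u v, order = u ++ p.1 :: v ∧ p.1 ∉ u ∧ p.2 ∈ u := by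
    rw [verifyOrderIsCorrect, goA_eq_any]
    simp only [Bool.not_eq_eq_eq_not, Bool.not_true, List.any_eq_false]
    constructor
    · intro h p hp
      rw [← badB_iff_split]
      simp [h p hp]
    · intro h p hp
      have := h p hp
      rw [← badB_iff_split] at this
      simpa using this
  have hB : verifyOrderIsCorrect_alt rules order = true ↔
      ∀ p ∈ rules, ¬ ∃ u v, order = u ++ p.1 :: v ∧ p.1 ∉ u ∧ p.2 ∈ u := by
    rw [verifyOrderIsCorrect_alt,
      goB_true_iff (buildAfters rules) order PySem.Set.empty [] (fun x => by
        simp [PySem.Set.empty])]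
    constructor
    · intro h p hp hbad
      obtain ⟨u, v, hsplit, hbu, hau⟩ := hbad
      have hmem : (p.1, p.2) ∈ rules := by simpa using hp
      have := h u p.1 v hsplit (by simpa using hbu) p.2
        ((mem_afters rules p.1 p.2).mpr hmem)
      exact this (by simpa using hau)
    · intro h u b v hsplit hbu a ha hau
      exact h (b, a) ((mem_afters rules b a).mp ha)
        ⟨u, v, hsplit, by simpa using hbu, by simpa using hau⟩
  cases hval : verifyOrderIsCorrect_alt rules order with
  | true => exact hA.mpr (hB.mp hval)
  | false =>
    cases hval' : verifyOrderIsCorrect rules order with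
    | false => rfl
    | true => exact absurd (hB.mpr (hA.mp hval')) (by simp [hval])

-- ===== VERDICT (by name: the statement is the Claim_ definition above) =====
theorem verifyOrderIsCorrect_spec : Claim_equal_verifyOrderIsCorrect := by
  intro rules order _
  exact main_eq rules order
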